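-- pv_equiv track=rewrite | github.com/exc33ded/GFG-Practice | Basic/Union of two arrays/union-of-two-arrays.py | doUnion
-- ===== SOURCE A (Python) =====
-- def doUnion(a,n,b,m):
--
--     num_dict = {}
--
--     for num in a:
--         num_dict[num] = 1
--     for num in b:
--         num_dict[num] = 1
--
--     union_list = list(num_dict.keys())
--
--     return len(union_list)
-- ===== SOURCE B (Python) =====
-- def doUnion(a, n, b, m):
--     c = sorted(a + b)
--     if not c:
--         return 0
--     cnt = 1
--     prev = c[0]
--     for y in c[1:]:
--         if y != prev:
--             cnt += 1
--         prev = y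
--     return cnt
-- ===== Notes on version B (the rewrite author's own statement) =====
-- stated objective: alternative
-- what changed: Replaces the hash-table (dict-of-keys) distinct count with sort-then-adjacent-scan: concatenate, sort, count positions whose value differs from the previous one.
import Mathlib
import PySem

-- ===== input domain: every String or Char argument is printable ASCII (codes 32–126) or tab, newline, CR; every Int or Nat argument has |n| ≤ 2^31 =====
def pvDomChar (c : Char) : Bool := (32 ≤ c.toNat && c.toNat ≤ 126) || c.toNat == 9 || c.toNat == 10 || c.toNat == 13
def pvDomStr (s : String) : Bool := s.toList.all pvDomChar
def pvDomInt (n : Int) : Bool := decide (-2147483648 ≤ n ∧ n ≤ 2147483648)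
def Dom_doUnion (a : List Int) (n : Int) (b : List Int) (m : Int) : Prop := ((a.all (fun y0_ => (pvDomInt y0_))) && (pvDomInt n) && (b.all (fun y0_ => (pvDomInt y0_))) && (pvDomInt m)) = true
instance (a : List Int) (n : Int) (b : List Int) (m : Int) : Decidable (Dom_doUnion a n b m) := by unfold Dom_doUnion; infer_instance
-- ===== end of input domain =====

-- B replaces A's dict-of-keys distinct count with sort-then-adjacent-scan (alternative algorithm, not claimed faster).


-- ===== PORT A =====
def doUnion (a : List Int) (n : Int) (b : List Int) (m : Int) : Int :=
  let numDict : PySem.Dict Int Int := PySem.Dict.empty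
  let numDict := a.foldl (fun d num => d.insert num 1) numDict
  let numDict := b.foldl (fun d num => d.insert num 1) numDict
  let unionList := numDict.keys
  (unionList.length : Int)

-- ===== PORT B =====
def doUnion_alt (a : List Int) (n : Int) (b : List Int) (m : Int) : Int :=
  match PySem.List.sorted (a ++ b) (fun x => x) with
  | [] => 0
  | x :: rest =>
      (rest.foldl (fun st y => if y ≠ st.2 then (st.1 + 1, y) else (st.1, y)) ((1 : Int), x)).1

-- ===== PRECONDITION & SPEC =====
def Spec_doUnion (a : List Int) (n : Int) (b : List Int) (m : Int) (out : Int) : Prop := out = doUnion_alt a n b m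
instance (a : List Int) (n : Int) (b : List Int) (m : Int) (out : Int) : Decidable (Spec_doUnion a n b m out) := by unfold Spec_doUnion; infer_instance

-- ===== CLAIM (what is proved, stated in full; the proofs are below) =====
def Claim_equal_doUnion : Prop := ∀ (a : List Int) (n : Int) (b : List Int) (m : Int), Dom_doUnion a n b m → Spec_doUnion a n b m (doUnion a n b m)

-- ===== LEMMAS AND PROOFS =====

-- the scan step of B: (count, previous) updated by one element
def pvStep (st : Int × Int) (y : Int) : Int × Int :=
  if y ≠ st.2 then (st.1 + 1, y) else (st.1, y)

lemma pvStep_shift (l : List Int) : ∀ (c x : Int),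
    (l.foldl pvStep (c, x)).1 = c + (l.foldl pvStep ((0 : Int), x)).1 := by
  induction l with
  | nil => intro c x; simp
  | cons y t ih =>
    intro c x
    by_cases h : y = x
    · have e1 : pvStep (c, x) y = (c, y) := by simp [pvStep, h]
      have e2 : pvStep ((0 : Int), x) y = (0, y) := by simp [pvStep, h]
      rw [List.foldl_cons, List.foldl_cons, e1, e2]
      exact ih c y
    · have e1 : pvStep (c, x) y = (c + 1, y) := by simp [pvStep, h]
      have e2 : pvStep ((0 : Int), x) y = (0 + 1, y) := by simp [pvStep, h]
      rw [List.foldl_cons, List.foldl_cons, e1, e2, ih (c + 1) y, ih (0 + 1) y]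
      ring

lemma pvCount_sorted : ∀ (rest : List Int) (x : Int), (x :: rest).Pairwise (· ≤ ·) →
    1 + (rest.foldl pvStep ((0 : Int), x)).1 = (((x :: rest).toFinset.card : Nat) : Int) := by
  intro rest
  induction rest with
  | nil => intro x _; simp
  | cons y t ih =>
    intro x hp
    have hxy : x ≤ y := (List.pairwise_cons.1 hp).1 y (by simp)
    have hxall : ∀ z ∈ t, x ≤ z := fun z hz => (List.pairwise_cons.1 hp).1 z (by simp [hz])
    have hp' : (y :: t).Pairwise (· ≤ ·) := (List.pairwise_cons.1 hp).2
    have hyall : ∀ z ∈ t, y ≤ z := (List.pairwise_cons.1 hp').1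
    by_cases h : y = x
    · subst h
      have hfin : (y :: y :: t).toFinset = (y :: t).toFinset := by
        simp [List.toFinset_cons]
      rw [hfin]
      have := ih y hp'
      simpa [List.foldl_cons, pvStep] using this
    · have hxnot : x ∉ (y :: t).toFinset := by
        simp only [List.mem_toFinset, List.mem_cons]
        rintro (rfl | hx)
        · exact h rfl
        · exact h (le_antisymm (hyall x hx) hxy)
      have hcard : (x :: y :: t).toFinset.card = (y :: t).toFinset.card + 1 := by
        rw [List.toFinset_cons, Finset.card_insert_of_notMem hxnot]
      have hstep : (y :: t).foldl pvStep ((0 : Int), x) = t.foldl pvStep ((1 : Int), y) := by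
        simp [List.foldl_cons, pvStep, h]
      rw [hstep, pvStep_shift t 1 y, hcard]
      have := ih y hp'
      push_cast
      omega

-- A's keys-building loop, instance of the library lemma
lemma pvKeysA (l : List Int) (d : PySem.Dict Int Int) :
    (l.foldl (fun d num => d.insert num 1) d).keys = PySem.Set.update d.keys l :=
  PySem.Dict.keys_foldl_insert l (fun _ _ => (1 : Int)) d

lemma pvA_card (a b : List Int) (n m : Int) :
    doUnion a n b m = (((a ++ b).toFinset.card : Nat) : Int) := by
  show (((b.foldl (fun d num => d.insert num 1)
      (a.foldl (fun d num => d.insert num 1) (PySem.Dict.empty : PySem.Dict Int Int))).keys).length : Int) = _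
  rw [pvKeysA, pvKeysA]
  have hkeys : PySem.Set.update (PySem.Set.update (PySem.Dict.empty : PySem.Dict Int Int).keys a) b
      = PySem.Set.ofList (a ++ b) := by
    simp [PySem.Set.update, PySem.Set.ofList_eq_foldl, List.foldl_append,
      PySem.Dict.keys_empty]
  rw [hkeys]
  have hfin : (PySem.Set.ofList (a ++ b) : List Int).toFinset = (a ++ b).toFinset := by
    ext z; simp [List.mem_toFinset, PySem.Set.mem_ofList]
  have hnd : (PySem.Set.ofList (a ++ b) : List Int).Nodup := PySem.Set.nodup_ofList _
  rw [← List.toFinset_card_of_nodup hnd, hfin]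

lemma pvB_card (a b : List Int) (n m : Int) :
    doUnion_alt a n b m = (((a ++ b).toFinset.card : Nat) : Int) := by
  unfold doUnion_alt
  rcases hs : PySem.List.sorted (a ++ b) (fun x => x) with _ | ⟨x, rest⟩
  · have : a ++ b = [] := (PySem.List.sorted_eq_nil_iff _ _ _).1 hs
    simp [this]
  · have hperm : (x :: rest).Perm (a ++ b) := hs ▸ PySem.List.sorted_perm (a ++ b) (fun x => x) false
    have hpw : (x :: rest).Pairwise (· ≤ ·) := by
      have := PySem.List.sorted_pairwise (a ++ b) (fun x => x)
      rw [hs] at this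
      simpa using this
    have hfin : (x :: rest).toFinset = (a ++ b).toFinset := by
      ext z
      have hz := hperm.mem_iff (a := z)
      simp only [List.mem_toFinset]
      simpa using hz
    show (rest.foldl (fun st y => if y ≠ st.2 then (st.1 + 1, y) else (st.1, y)) ((1 : Int), x)).1
        = (((a ++ b).toFinset.card : Nat) : Int)
    rw [← hfin, ← pvCount_sorted rest x hpw]
    have hfold : (rest.foldl (fun st y => if y ≠ st.2 then (st.1 + 1, y) else (st.1, y)) ((1 : Int), x)).1
        = (rest.foldl pvStep ((1 : Int), x)).1 := rfl
    rw [hfold, pvStep_shift rest 1 x]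

-- ===== VERDICT (by name: the statement is the Claim_ definition above) =====
theorem doUnion_spec : Claim_equal_doUnion := by
  intro a n b m _
  show doUnion a n b m = doUnion_alt a n b m
  rw [pvA_card a b n m, pvB_card a b n m]
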